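-- pv_equiv track=rewrite | github.com/GSmily/Coursework | CS 5050 - Advanced Algorithms/Assignments/Assignment 2/script.py | knap_recursive
-- ===== SOURCE A (Python) =====
-- def knap_recursive(knapsack_1, knapsack_2, item_bag):
--     if knapsack_1 == knapsack_2 == 0:
--         return True
--     if knapsack_1 < 0 or knapsack_2 < 0:
--         return False
--     if item_bag is None:
--         return False
--
--     for item in item_bag:
--         bag = item_bag[:]
--         bag.remove(item)
--         if knap_recursive(knapsack_1 - item, knapsack_2, bag):
--             return True
--
--     for item in item_bag:
--         bag = item_bag[:]
--         bag.remove(item)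
--         if knap_recursive(knapsack_1, knapsack_2 - item, bag):
--             return True
--
--     return False
-- ===== SOURCE B (Python) =====
-- def knap_recursive(knapsack_1, knapsack_2, item_bag):
--     if knapsack_1 < 0 or knapsack_2 < 0:
--         return False
--     states = {(knapsack_1, knapsack_2)}
--     for item in (item_bag or []):
--         states |= {(a - item, b) for a, b in states} | {(a, b - item) for a, b in states}
--     return (0, 0) in states
-- ===== Notes on version B (the rewrite author's own statement) =====
-- stated objective: alternative
-- what changed: Replaces the recursion that re-tries every item order on copied lists with a single left-to-right pass maintaining the deduplicated set of reachable (remaining1, remaining2) capacity pairs.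
import Mathlib
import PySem

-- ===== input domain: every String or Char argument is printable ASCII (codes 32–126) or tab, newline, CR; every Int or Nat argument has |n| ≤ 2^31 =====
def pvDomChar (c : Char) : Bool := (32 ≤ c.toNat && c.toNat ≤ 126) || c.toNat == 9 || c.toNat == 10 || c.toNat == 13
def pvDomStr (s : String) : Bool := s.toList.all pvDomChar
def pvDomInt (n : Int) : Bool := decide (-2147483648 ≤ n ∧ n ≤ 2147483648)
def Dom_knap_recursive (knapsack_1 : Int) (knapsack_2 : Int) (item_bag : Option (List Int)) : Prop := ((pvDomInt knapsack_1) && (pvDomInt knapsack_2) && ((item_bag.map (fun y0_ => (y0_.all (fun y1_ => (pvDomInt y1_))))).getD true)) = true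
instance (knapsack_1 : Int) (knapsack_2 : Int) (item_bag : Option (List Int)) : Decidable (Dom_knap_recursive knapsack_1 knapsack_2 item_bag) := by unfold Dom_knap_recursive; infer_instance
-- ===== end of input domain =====

-- B replaces A's order-retrying recursion with one pass maintaining the deduplicated set of
-- reachable (remaining1, remaining2) capacity pairs (objective: alternative).


-- ===== PORT A =====
-- 'bag = item_bag[:]; bag.remove(item)' = List.erase (first occurrence); the two 'for' loops with
-- early 'return True' are the two 'any's.
def knap_recursive (knapsack_1 : Int) (knapsack_2 : Int) (item_bag : Option (List Int)) : Bool :=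
  if knapsack_1 = 0 ∧ knapsack_2 = 0 then true
  else if knapsack_1 < 0 ∨ knapsack_2 < 0 then false
  else match item_bag with
  | none => false
  | some l =>
      (l.attach.any fun x => knap_recursive (knapsack_1 - x.1) knapsack_2 (some (l.erase x.1))) ||
      (l.attach.any fun x => knap_recursive knapsack_1 (knapsack_2 - x.1) (some (l.erase x.1)))
termination_by (match item_bag with | none => 0 | some l => l.length)
decreasing_by
  · simp only [List.length_erase_of_mem x.2]
    have := List.length_pos_of_mem x.2
    omega
  · simp only [List.length_erase_of_mem x.2]
    have := List.length_pos_of_mem x.2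
    omega

-- ===== PORT B =====
-- 'states |= {(a-item,b) …} | {(a,b-item) …}' over 'item_bag or []', then '(0,0) in states'.
def knap_recursive_alt (knapsack_1 : Int) (knapsack_2 : Int) (item_bag : Option (List Int)) : Bool :=
  if knapsack_1 < 0 ∨ knapsack_2 < 0 then false
  else
    let states := (item_bag.getD []).foldl
      (fun S item => PySem.Set.union S (PySem.Set.union
          (PySem.Set.ofList (S.map (fun p => (p.1 - item, p.2))))
          (S.map (fun p => (p.1, p.2 - item)))))
      (PySem.Set.ofList [(knapsack_1, knapsack_2)])
    PySem.Set.contains states (0, 0)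

-- ===== PRECONDITION & SPEC =====
def Spec_knap_recursive (knapsack_1 : Int) (knapsack_2 : Int) (item_bag : Option (List Int)) (out : Bool) : Prop := out = knap_recursive_alt knapsack_1 knapsack_2 item_bag
instance (knapsack_1 : Int) (knapsack_2 : Int) (item_bag : Option (List Int)) (out : Bool) : Decidable (Spec_knap_recursive knapsack_1 knapsack_2 item_bag out) := by unfold Spec_knap_recursive; infer_instance

-- ===== CLAIM (what is proved, stated in full; the proofs are below) =====
def Claim_equal_knap_recursive : Prop := ∀ (knapsack_1 : Int) (knapsack_2 : Int) (item_bag : Option (List Int)), Dom_knap_recursive knapsack_1 knapsack_2 item_bag → Spec_knap_recursive knapsack_1 knapsack_2 item_bag (knap_recursive knapsack_1 knapsack_2 item_bag)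

-- ===== LEMMAS AND PROOFS =====

-- 'Pick l s1 s2': some two disjoint sub-multisets of l sum to s1 and s2 (processed head first).
inductive Pick : List Int → Int → Int → Prop
  | nil : Pick [] 0 0
  | skip (x : Int) {l s1 s2} : Pick l s1 s2 → Pick (x :: l) s1 s2
  | one (x : Int) {l s1 s2} : Pick l s1 s2 → Pick (x :: l) (s1 + x) s2
  | two (x : Int) {l s1 s2} : Pick l s1 s2 → Pick (x :: l) s1 (s2 + x)

theorem pick_zero (l : List Int) : Pick l 0 0 := by
  induction l with
  | nil => exact .nil
  | cons x l ih => exact .skip x ih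

theorem pick_nil_iff {s1 s2 : Int} : Pick [] s1 s2 ↔ s1 = 0 ∧ s2 = 0 := by
  constructor
  · intro h; cases h; exact ⟨rfl, rfl⟩
  · rintro ⟨rfl, rfl⟩; exact .nil

theorem pick_cons_iff {x : Int} {l : List Int} {s1 s2 : Int} :
    Pick (x :: l) s1 s2 ↔
      Pick l s1 s2 ∨ (∃ t1, s1 = t1 + x ∧ Pick l t1 s2) ∨ (∃ t2, s2 = t2 + x ∧ Pick l s1 t2) := by
  constructor
  · intro h
    cases h with
    | skip _ h => exact .inl h
    | one _ h => exact .inr (.inl ⟨_, rfl, h⟩)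
    | two _ h => exact .inr (.inr ⟨_, rfl, h⟩)
  · rintro (h | ⟨t1, rfl, h⟩ | ⟨t2, rfl, h⟩)
    · exact .skip x h
    · exact .one x h
    · exact .two x h

theorem pick_perm {l l' : List Int} (h : l.Perm l') :
    ∀ {s1 s2 : Int}, Pick l s1 s2 → Pick l' s1 s2 := by
  induction h with
  | nil => exact fun h => h
  | cons x _ ih =>
    intro s1 s2 hp
    cases hp with
    | skip _ h => exact .skip x (ih h)
    | one _ h => exact .one x (ih h)
    | two _ h => exact .two x (ih h)
  | swap x y l =>
    intro s1 s2 hp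
    cases hp with
    | skip _ h =>
      cases h with
      | skip _ h => exact .skip x (.skip y h)
      | one _ h => exact .one x (.skip y h)
      | two _ h => exact .two x (.skip y h)
    | one _ h =>
      cases h with
      | skip _ h => exact .skip x (.one y h)
      | one _ h =>
        rw [add_right_comm]
        exact .one x (.one y h)
      | two _ h => exact .two x (.one y h)
    | two _ h =>
      cases h with
      | skip _ h => exact .skip x (.two y h)
      | one _ h => exact .one x (.two y h)
      | two _ h =>
        rw [add_right_comm]
        exact .two x (.two y h)
  | trans _ _ ih1 ih2 => exact fun hp => ih2 (ih1 hp)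

theorem pick_append_one (u : List Int) {l : List Int} {s1 s2 : Int} (h : Pick l s1 s2) :
    Pick (u ++ l) (s1 + u.sum) s2 := by
  induction u with
  | nil => simpa using h
  | cons x u ih =>
    have := Pick.one x ih
    simpa [add_assoc, add_comm x u.sum] using this

theorem pick_append_two (v : List Int) {l : List Int} {s1 s2 : Int} (h : Pick l s1 s2) :
    Pick (v ++ l) s1 (s2 + v.sum) := by
  induction v with
  | nil => simpa using h
  | cons x v ih =>
    have := Pick.two x ih
    simpa [add_assoc, add_comm x v.sum] using this

theorem pick_iff_exists {l : List Int} {s1 s2 : Int} :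
    Pick l s1 s2 ↔ ∃ u v r : List Int, l.Perm (u ++ v ++ r) ∧ u.sum = s1 ∧ v.sum = s2 := by
  constructor
  · intro h
    induction h with
    | nil => exact ⟨[], [], [], List.Perm.refl _, rfl, rfl⟩
    | skip x _ ih =>
      obtain ⟨u, v, r, hp, hu, hv⟩ := ih
      refine ⟨u, v, x :: r, ?_, hu, hv⟩
      have h1 : (x :: _).Perm (x :: (u ++ v ++ r)) := hp.cons x
      refine h1.trans ?_
      simpa [List.append_assoc] using (List.perm_middle (a := x) (l₁ := u ++ v) (l₂ := r)).symm
    | one x _ ih =>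
      obtain ⟨u, v, r, hp, hu, hv⟩ := ih
      exact ⟨x :: u, v, r, hp.cons x, by simp [hu, add_comm], hv⟩
    | two x _ ih =>
      obtain ⟨u, v, r, hp, hu, hv⟩ := ih
      refine ⟨u, x :: v, r, ?_, hu, by simp [hv, add_comm]⟩
      refine (hp.cons x).trans ?_
      simpa [List.append_assoc] using (List.perm_middle (a := x) (l₁ := u) (l₂ := v ++ r)).symm
  · rintro ⟨u, v, r, hp, rfl, rfl⟩
    refine pick_perm hp.symm ?_
    have h0 : Pick r 0 0 := pick_zero r
    have h1 : Pick (v ++ r) 0 (0 + v.sum) := pick_append_two v h0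
    have h2 : Pick (u ++ (v ++ r)) (0 + u.sum) (0 + v.sum) := pick_append_one u h1
    simpa [List.append_assoc] using h2

theorem pick_erase_one {x : Int} {l : List Int} {s1 s2 : Int} (hx : x ∈ l)
    (h : Pick (l.erase x) s1 s2) : Pick l (s1 + x) s2 :=
  pick_perm (List.perm_cons_erase hx).symm (.one x h)

theorem pick_erase_two {x : Int} {l : List Int} {s1 s2 : Int} (hx : x ∈ l)
    (h : Pick (l.erase x) s1 s2) : Pick l s1 (s2 + x) :=
  pick_perm (List.perm_cons_erase hx).symm (.two x h)

-- A's two loops together equal: k1,k2 nonnegative and some disjoint pair of sub-multisets sums to them.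
theorem A_some_iff : ∀ (n : Nat) (l : List Int), l.length = n → ∀ (k1 k2 : Int),
    (knap_recursive k1 k2 (some l) = true ↔ 0 ≤ k1 ∧ 0 ≤ k2 ∧ Pick l k1 k2) := by
  intro n
  induction n using Nat.strong_induction_on with
  | _ n IH =>
  intro l hlen k1 k2
  rw [knap_recursive]
  by_cases h0 : k1 = 0 ∧ k2 = 0
  · obtain ⟨rfl, rfl⟩ := h0
    simp [pick_zero]
  · rw [if_neg h0]
    by_cases hneg : k1 < 0 ∨ k2 < 0
    · rw [if_pos hneg]
      simp only [Bool.false_eq_true, false_iff]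
      rintro ⟨h1, h2, -⟩
      omega
    · rw [if_neg hneg]
      push Not at hneg
      obtain ⟨h1, h2⟩ := hneg
      simp only [Bool.or_eq_true, List.any_eq_true]
      constructor
      · rintro (⟨⟨x, hx⟩, -, hrec⟩ | ⟨⟨x, hx⟩, -, hrec⟩)
        · have hlt : (l.erase x).length < n := by
            rw [List.length_erase_of_mem hx]
            have := List.length_pos_of_mem hx
            omega
          have hp := ((IH _ hlt (l.erase x) rfl (k1 - x) k2).mp hrec).2.2
          have hp2 : Pick l k1 k2 := by simpa using pick_erase_one hx hp
          exact ⟨h1, h2, hp2⟩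
        · have hlt : (l.erase x).length < n := by
            rw [List.length_erase_of_mem hx]
            have := List.length_pos_of_mem hx
            omega
          have hp := ((IH _ hlt (l.erase x) rfl k1 (k2 - x)).mp hrec).2.2
          have hp2 : Pick l k1 k2 := by simpa using pick_erase_two hx hp
          exact ⟨h1, h2, hp2⟩
      · rintro ⟨-, -, hp⟩
        obtain ⟨u, v, r, hperm, hu, hv⟩ := pick_iff_exists.mp hp
        -- helper facts
        have hrec1 : ∀ x ∈ u, knap_recursive (k1 - x) k2 (some (l.erase x)) = true →
            (∃ a, a ∈ l.attach ∧ knap_recursive (k1 - a.1) k2 (some (l.erase a.1)) = true) := by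
          intro x hxu hr
          have hxl : x ∈ l := hperm.mem_iff.mpr (by simp [hxu])
          exact ⟨⟨x, hxl⟩, List.mem_attach _ _, hr⟩
        have hrec2 : ∀ x ∈ v, knap_recursive k1 (k2 - x) (some (l.erase x)) = true →
            (∃ a, a ∈ l.attach ∧ knap_recursive k1 (k2 - a.1) (some (l.erase a.1)) = true) := by
          intro x hxv hr
          have hxl : x ∈ l := hperm.mem_iff.mpr (by simp [hxv])
          exact ⟨⟨x, hxl⟩, List.mem_attach _ _, hr⟩
        have hlt : ∀ x ∈ l, (l.erase x).length < n := by
          intro x hx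
          rw [List.length_erase_of_mem hx]
          have := List.length_pos_of_mem hx
          omega
        -- Pick of the erased list when x is taken from u (resp. v)
        have hpick1 : ∀ x ∈ u, Pick (l.erase x) (k1 - x) k2 := by
          intro x hxu
          have hxl : x ∈ l := hperm.mem_iff.mpr (by simp [hxu])
          have hperm' : (l.erase x).Perm ((u.erase x) ++ v ++ r) := by
            rw [List.perm_iff_count]
            intro a
            have hc := hperm.count_eq a
            have hcu : 0 < u.count x := List.count_pos_iff.mpr hxu
            simp only [List.count_append, List.count_erase] at hc ⊢
            split_ifs with hax
            · have hxa : x = a := by simpa using hax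
              subst hxa; omega
            · omega
          exact pick_iff_exists.mpr ⟨u.erase x, v, r, hperm', by
            have := List.sum_erase hxu; omega, hv⟩
        have hpick2 : ∀ x ∈ v, Pick (l.erase x) k1 (k2 - x) := by
          intro x hxv
          have hperm' : (l.erase x).Perm (u ++ (v.erase x) ++ r) := by
            rw [List.perm_iff_count]
            intro a
            have hc := hperm.count_eq a
            have hcv : 0 < v.count x := List.count_pos_iff.mpr hxv
            simp only [List.count_append, List.count_erase] at hc ⊢
            split_ifs with hax
            · have hxa : x = a := by simpa using hax
              subst hxa; omega
            · omega
          exact pick_iff_exists.mpr ⟨u, v.erase x, r, hperm', hu, by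
            have := List.sum_erase hxv; omega⟩
        by_cases hn : ∃ x ∈ u, x < 0
        · obtain ⟨x, hxu, hxneg⟩ := hn
          refine .inl (hrec1 x hxu ?_)
          have hxl : x ∈ l := hperm.mem_iff.mpr (by simp [hxu])
          exact (IH _ (hlt x hxl) _ rfl _ _).mpr ⟨by omega, h2, hpick1 x hxu⟩
        by_cases hn2 : ∃ x ∈ v, x < 0
        · obtain ⟨x, hxv, hxneg⟩ := hn2
          refine .inr (hrec2 x hxv ?_)
          have hxl : x ∈ l := hperm.mem_iff.mpr (by simp [hxv])
          exact (IH _ (hlt x hxl) _ rfl _ _).mpr ⟨h1, by omega, hpick2 x hxv⟩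
        push Not at hn hn2
        cases u with
        | cons x u' =>
          have hxu : x ∈ x :: u' := by simp
          have hxl : x ∈ l := hperm.mem_iff.mpr (by simp)
          have hsum : 0 ≤ u'.sum :=
            List.sum_nonneg (fun y hy => hn y (List.mem_cons_of_mem x hy))
          have hk1x : 0 ≤ k1 - x := by
            have : x + u'.sum = k1 := by simpa using hu
            omega
          refine .inl (hrec1 x hxu ?_)
          exact (IH _ (hlt x hxl) _ rfl _ _).mpr ⟨hk1x, h2, hpick1 x hxu⟩
        | nil =>
          cases v with
          | cons x v' =>
            have hxv : x ∈ x :: v' := by simp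
            have hxl : x ∈ l := hperm.mem_iff.mpr (by simp)
            have hsum : 0 ≤ v'.sum :=
              List.sum_nonneg (fun y hy => hn2 y (List.mem_cons_of_mem x hy))
            have hk2x : 0 ≤ k2 - x := by
              have : x + v'.sum = k2 := by simpa using hv
              omega
            refine .inr (hrec2 x hxv ?_)
            exact (IH _ (hlt x hxl) _ rfl _ _).mpr ⟨h1, hk2x, hpick2 x hxv⟩
          | nil =>
            exact absurd ⟨by simpa using hu.symm, by simpa using hv.symm⟩ h0

-- membership in B's folded state set = a Pick of the processed items, subtracted from a start state
theorem mem_fold (l : List Int) : ∀ (S : List (Int × Int)) (p : Int × Int),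
    (p ∈ l.foldl
      (fun S item => PySem.Set.union S (PySem.Set.union
          (PySem.Set.ofList (S.map (fun p => (p.1 - item, p.2))))
          (S.map (fun p => (p.1, p.2 - item))))) S
      ↔ ∃ q ∈ S, ∃ s1 s2, Pick l s1 s2 ∧ p = (q.1 - s1, q.2 - s2)) := by
  induction l with
  | nil =>
    intro S p
    simp only [List.foldl_nil, pick_nil_iff]
    constructor
    · intro hp
      exact ⟨p, hp, 0, 0, ⟨rfl, rfl⟩, by simp⟩
    · rintro ⟨q, hq, s1, s2, ⟨rfl, rfl⟩, rfl⟩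
      simpa using hq
  | cons x l ih =>
    intro S p
    rw [List.foldl_cons, ih]
    constructor
    · rintro ⟨q, hq, s1, s2, hp, rfl⟩
      rw [PySem.Set.mem_union, PySem.Set.mem_union, PySem.Set.mem_ofList] at hq
      rcases hq with hq | hq | hq
      · exact ⟨q, hq, s1, s2, .skip x hp, rfl⟩
      · obtain ⟨q', hq', rfl⟩ := List.mem_map.mp hq
        refine ⟨q', hq', s1 + x, s2, .one x hp, ?_⟩
        simp only [Prod.mk.injEq]
        exact ⟨by ring, trivial⟩
      · obtain ⟨q', hq', rfl⟩ := List.mem_map.mp hq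
        refine ⟨q', hq', s1, s2 + x, .two x hp, ?_⟩
        simp only [Prod.mk.injEq]
        exact ⟨trivial, by ring⟩
    · rintro ⟨q, hq, s1, s2, hp, rfl⟩
      rcases pick_cons_iff.mp hp with hp' | ⟨t1, rfl, hp'⟩ | ⟨t2, rfl, hp'⟩
      · refine ⟨q, ?_, s1, s2, hp', rfl⟩
        rw [PySem.Set.mem_union]
        exact .inl hq
      · refine ⟨(q.1 - x, q.2), ?_, t1, s2, hp', ?_⟩
        · rw [PySem.Set.mem_union, PySem.Set.mem_union, PySem.Set.mem_ofList]
          exact .inr (.inl (List.mem_map.mpr ⟨q, hq, rfl⟩))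
        · simp only [Prod.mk.injEq]
          exact ⟨by ring, trivial⟩
      · refine ⟨(q.1, q.2 - x), ?_, s1, t2, hp', ?_⟩
        · rw [PySem.Set.mem_union, PySem.Set.mem_union, PySem.Set.mem_ofList]
          exact .inr (.inr (List.mem_map.mpr ⟨q, hq, rfl⟩))
        · simp only [Prod.mk.injEq]
          exact ⟨trivial, by ring⟩

theorem B_iff (k1 k2 : Int) (bag : Option (List Int)) :
    knap_recursive_alt k1 k2 bag = true ↔ 0 ≤ k1 ∧ 0 ≤ k2 ∧ Pick (bag.getD []) k1 k2 := by
  rw [knap_recursive_alt]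
  by_cases hneg : k1 < 0 ∨ k2 < 0
  · rw [if_pos hneg]
    simp only [Bool.false_eq_true, false_iff]
    rintro ⟨h1, h2, -⟩
    omega
  · rw [if_neg hneg]
    push Not at hneg
    rw [PySem.Set.contains_iff, mem_fold]
    constructor
    · rintro ⟨q, hq, s1, s2, hp, heq⟩
      have hq' : q = (k1, k2) := by simpa [PySem.Set.ofList, PySem.Set.add] using hq
      subst hq'
      have h1 : s1 = k1 ∧ s2 = k2 := by
        injection heq with e1 e2
        omega
      obtain ⟨rfl, rfl⟩ := h1
      exact ⟨hneg.1, hneg.2, hp⟩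
    · rintro ⟨h1, h2, hp⟩
      exact ⟨(k1, k2), by simp [PySem.Set.ofList, PySem.Set.add], k1, k2, hp, by simp⟩

-- ===== VERDICT (by name: the statement is the Claim_ definition above) =====
theorem knap_recursive_spec : Claim_equal_knap_recursive := by
  intro k1 k2 bag _
  show knap_recursive k1 k2 bag = knap_recursive_alt k1 k2 bag
  apply Bool.coe_iff_coe.mp
  rw [B_iff]
  match bag with
  | some l => exact A_some_iff l.length l rfl k1 k2
  | none =>
    rw [knap_recursive]
    by_cases h0 : k1 = 0 ∧ k2 = 0
    · obtain ⟨rfl, rfl⟩ := h0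
      simp [pick_zero]
    · rw [if_neg h0]
      constructor
      · intro h
        split at h <;> simp_all
      · rintro ⟨h1, h2, hp⟩
        exfalso
        exact h0 (by simpa using pick_nil_iff.mp hp)
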